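-- pv_equiv track=rewrite | github.com/Nafiz-codes/Course-Codes | CSE221/Assignment-03/B.py | merge_sort_and_count
-- ===== SOURCE A (Python) =====
-- from bisect import bisect_right
--
-- def merge_sort_and_count(arr):
--     if len(arr) <= 1:
--         return arr, 0
--
--     mid = len(arr) // 2
--     left, invrs_l = merge_sort_and_count(arr[:mid])
--     right, invrs_r = merge_sort_and_count(arr[mid:])
--     merged, invrs_split = merge_and_count_special(left, right)
--
--     return merged, invrs_l + invrs_r + invrs_split
--
-- def merge_and_count_special(left, right):
--     merged = []
--     invrs_c = 0
--
--     right_squares = sorted([x * x for x in right])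
--
--     for val in left:
--         c = bisect_right(right_squares, val - 1)
--         invrs_c += c
--
--
--     i = j = 0
--     while i < len(left) and j < len(right):
--         if left[i] <= right[j]:
--             merged.append(left[i])
--             i += 1
--         else:
--             merged.append(right[j])
--             j += 1
--     merged.extend(left[i:])
--     merged.extend(right[j:])
--     return merged, invrs_c
-- ===== SOURCE B (Python) =====
-- def merge_sort_and_count(arr):
--     if len(arr) <= 1:
--         return arr, 0
--     mid = len(arr) // 2
--     left, cl = merge_sort_and_count(arr[:mid])
--     right, cr = merge_sort_and_count(arr[mid:])
--     # squares of the already-sorted `right`, split by sign: each part is a monotone run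
--     # (reversed negatives ascend, non-negatives ascend), so timsort merges them in linear time
--     neg_sq = [x * x for x in right if x < 0]
--     neg_sq.reverse()
--     pos_sq = [x * x for x in right if x >= 0]
--     sq = sorted(neg_sq + pos_sq)
--     # two-pointer cross count: `left` and `sq` both ascend, so k never moves back
--     cross = 0
--     k = 0
--     for val in left:
--         while k < len(sq) and sq[k] < val:
--             k += 1
--         cross += k
--     # left and right are sorted runs: timsort merges the concatenation in linear time
--     return sorted(left + right), cl + cr + cross
-- ===== Notes on version B (the rewrite author's own statement) =====
-- stated objective: faster
-- what changed: The per-merge cross count no longer sorts the squares and bisects once per left element: B splits the already-sorted right half by sign into two monotone square runs and counts with a single two-pointer sweep over the sorted left half, and it merges sorted runs by sorting their concatenation (a linear timsort run-merge) instead of an element-by-element Python merge loop.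
import Mathlib
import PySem

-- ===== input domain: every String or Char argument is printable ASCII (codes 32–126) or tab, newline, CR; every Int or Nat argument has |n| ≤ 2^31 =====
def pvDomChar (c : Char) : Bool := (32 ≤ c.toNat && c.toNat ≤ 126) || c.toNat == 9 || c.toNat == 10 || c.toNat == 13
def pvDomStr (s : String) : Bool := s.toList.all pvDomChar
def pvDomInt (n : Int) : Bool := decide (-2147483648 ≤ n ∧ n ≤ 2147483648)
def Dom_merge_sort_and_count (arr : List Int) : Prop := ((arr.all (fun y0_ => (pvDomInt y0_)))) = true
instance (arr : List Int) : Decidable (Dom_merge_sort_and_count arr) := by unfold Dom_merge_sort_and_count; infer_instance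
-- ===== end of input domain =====

-- B replaces A's per-merge "sort the squares, then one bisect per element" by a sign-split into
-- two monotone runs plus a single two-pointer sweep for the cross count, and merges runs by
-- sorting their concatenation instead of a hand-written merge loop.

-- ===== PORT A =====

-- the `while i < len(left) and j < len(right)` merge loop plus the two `extend`s,
-- with the index pair replaced by the two list suffixes (exact)
def pvMergeA : List Int → List Int → List Int
  | [], r => r
  | a :: l, [] => a :: l
  | a :: l, b :: r => if a ≤ b then a :: pvMergeA l (b :: r) else b :: pvMergeA (a :: l) r

-- merge_and_count_special: sorted(...) → PySem.List.sorted, bisect_right → PySem.List.bisectRight,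
-- the `for val in left` accumulation as a foldl
def pvSpecialA (left right : List Int) : List Int × Int :=
  let right_squares := PySem.List.sorted (right.map (fun x => x * x)) (fun x => x) false
  let invrs := left.foldl
    (fun acc val => acc + ((PySem.List.bisectRight right_squares (val - 1) : Nat) : Int)) 0
  (pvMergeA left right, invrs)

-- arr[:mid]/arr[mid:] with 0 ≤ mid ≤ len arr are exactly take/drop; len(arr)//2 on a Nat is Nat division
def merge_sort_and_count (arr : List Int) : List Int × Int :=
  if h : arr.length ≤ 1 then (arr, 0)
  else
    let mid := arr.length / 2
    let L := merge_sort_and_count (arr.take mid)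
    let R := merge_sort_and_count (arr.drop mid)
    let M := pvSpecialA L.1 R.1
    (M.1, L.2 + R.2 + M.2)
termination_by arr.length
decreasing_by
  · simp only [List.length_take]; omega
  · simp only [List.length_drop]; omega

-- ===== PORT B =====

-- the inner `while k < len(sq) and sq[k] < val: k += 1`
def pvBump (sq : List Int) (val : Int) (k : Nat) : Nat :=
  if h : k < sq.length then
    (if sq[k] < val then pvBump sq val (k + 1) else k)
  else k
termination_by sq.length - k

def merge_sort_and_count_alt (arr : List Int) : List Int × Int :=
  if h : arr.length ≤ 1 then (arr, 0)
  else
    let mid := arr.length / 2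
    let L := merge_sort_and_count_alt (arr.take mid)
    let R := merge_sort_and_count_alt (arr.drop mid)
    let neg_sq := ((R.1.filter (fun x => decide (x < 0))).map (fun x => x * x)).reverse
    let pos_sq := (R.1.filter (fun x => decide (0 ≤ x))).map (fun x => x * x)
    let sq := PySem.List.sorted (neg_sq ++ pos_sq) (fun x => x) false
    let cross := (L.1.foldl
      (fun (st : Nat × Int) val =>
        let k := pvBump sq val st.1; (k, st.2 + (k : Int))) (0, 0)).2
    (PySem.List.sorted (L.1 ++ R.1) (fun x => x) false, L.2 + R.2 + cross)
termination_by arr.length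
decreasing_by
  · simp only [List.length_take]; omega
  · simp only [List.length_drop]; omega

-- ===== PRECONDITION & SPEC =====
def Spec_merge_sort_and_count (arr : List Int) (out : List Int × Int) : Prop := out = merge_sort_and_count_alt arr
instance (arr : List Int) (out : List Int × Int) : Decidable (Spec_merge_sort_and_count arr out) := by unfold Spec_merge_sort_and_count; infer_instance

-- ===== CLAIM (what is proved, stated in full; the proofs are below) =====
def Claim_equal_merge_sort_and_count : Prop := ∀ (arr : List Int), Dom_merge_sort_and_count arr → Spec_merge_sort_and_count arr (merge_sort_and_count arr)

-- ===== LEMMAS AND PROOFS =====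

lemma pvMergeA_perm (a b : List Int) : (pvMergeA a b).Perm (a ++ b) := by
  fun_induction pvMergeA a b with
  | case1 => simp
  | case2 => simp
  | case3 a l b r h ih => exact ih.cons a
  | case4 a l b r h ih => exact (ih.cons b).trans List.perm_middle.symm

lemma mem_pvMergeA {z : Int} {a b : List Int} :
    z ∈ pvMergeA a b ↔ z ∈ a ∨ z ∈ b := by
  rw [(pvMergeA_perm a b).mem_iff, List.mem_append]

lemma pvMergeA_pairwise (a b : List Int) (ha : a.Pairwise (· ≤ ·)) (hb : b.Pairwise (· ≤ ·)) :
    (pvMergeA a b).Pairwise (· ≤ ·) := by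
  fun_induction pvMergeA a b with
  | case1 => exact hb
  | case2 => exact ha
  | case3 a l b r h ih =>
      rw [List.pairwise_cons] at ha hb ⊢
      refine ⟨fun z hz => ?_, ih ha.2 (List.pairwise_cons.mpr hb)⟩
      rcases mem_pvMergeA.mp hz with hz | hz
      · exact ha.1 z hz
      · rcases List.mem_cons.mp hz with rfl | hz
        · exact h
        · exact h.trans (hb.1 z hz)
  | case4 a l b r h ih =>
      rw [List.pairwise_cons] at hb
      have hba : b ≤ a := le_of_lt (lt_of_not_ge h)
      refine List.pairwise_cons.mpr ⟨fun z hz => ?_, ih ha hb.2⟩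
      rcases mem_pvMergeA.mp hz with hz | hz
      · rcases List.mem_cons.mp hz with rfl | hz
        · exact hba
        · exact hba.trans ((List.pairwise_cons.mp ha).1 z hz)
      · exact hb.1 z hz

-- in a sorted list the elements < val are exactly the first countP-many
lemma countP_sorted_lt (sq : List Int) (hs : sq.Pairwise (· ≤ ·)) (val : Int) :
    ∀ i (h : i < sq.length),
      (sq[i] < val ↔ i < sq.countP (fun y => decide (y < val))) := by
  induction sq with
  | nil => intro i h; simp at h
  | cons x t ih =>
      rw [List.pairwise_cons] at hs
      intro i h
      by_cases hx : x < val
      · have hc : (x :: t).countP (fun y => decide (y < val))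
            = t.countP (fun y => decide (y < val)) + 1 := by
          simp [List.countP_cons, hx]
        cases i with
        | zero => simpa [hc] using hx
        | succ i =>
            simp only [List.getElem_cons_succ, hc]
            rw [ih hs.2 i (by simpa using h)]
            omega
      · have ht0 : t.countP (fun y => decide (y < val)) = 0 := by
          rw [List.countP_eq_zero]
          intro y hy
          simp only [decide_eq_true_eq]
          exact fun hlt => hx (lt_of_le_of_lt (hs.1 y hy) hlt)
        have hc : (x :: t).countP (fun y => decide (y < val)) = 0 := by
          simp [List.countP_cons, hx, ht0]
        cases i with
        | zero => simpa [hc] using hx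
        | succ i =>
            have hi : i < t.length := by simpa using h
            simp only [List.getElem_cons_succ, hc]
            have : ¬ t[i] < val := by
              have := List.countP_eq_zero.mp ht0 t[i] (List.getElem_mem hi)
              simpa using this
            simpa using this

lemma bisect_eq_countP (sq : List Int) (hs : sq.Pairwise (· ≤ ·)) (val : Int) :
    PySem.List.bisectRight sq (val - 1) = sq.countP (fun y => decide (y < val)) := by
  obtain ⟨hlen, hpre, hpost⟩ := PySem.List.bisectRight_spec sq (val - 1) hs
  set k := PySem.List.bisectRight sq (val - 1) with hk
  set c := sq.countP (fun y => decide (y < val)) with hc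
  have hcl : c ≤ sq.length := List.countP_le_length
  rcases Nat.lt_trichotomy k c with hlt | heq | hgt
  · have hkl : k < sq.length := lt_of_lt_of_le hlt hcl
    have h1 : sq[k] < val := (countP_sorted_lt sq hs val k hkl).mpr hlt
    have h2 : val - 1 < sq[k] := hpost k hkl le_rfl
    omega
  · exact heq
  · have hcL : c < sq.length := lt_of_lt_of_le hgt hlen
    have h1 : sq[c] ≤ val - 1 := hpre c hcL hgt
    have h2 : ¬ sq[c] < val := fun hx => by
      have := (countP_sorted_lt sq hs val c hcL).mp hx
      omega
    omega

lemma pvBump_eq (sq : List Int) (hs : sq.Pairwise (· ≤ ·)) (val : Int) (k : Nat)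
    (hk : k ≤ sq.countP (fun y => decide (y < val))) :
    pvBump sq val k = sq.countP (fun y => decide (y < val)) := by
  revert hk
  fun_induction pvBump sq val k with
  | case1 k h hlt ih =>
      intro hk
      exact ih ((countP_sorted_lt sq hs val k h).mp hlt)
  | case2 k h hlt =>
      intro hk
      rcases Nat.lt_or_ge k (sq.countP (fun y => decide (y < val))) with hlt2 | hge
      · exact absurd ((countP_sorted_lt sq hs val k h).mpr hlt2) hlt
      · omega
  | case3 k h =>
      intro hk
      have := List.countP_le_length (p := fun y => decide (y < val)) (l := sq)
      omega

lemma foldA_sum (left : List Int) (f : Int → Int) :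
    left.foldl (fun acc val => acc + f val) 0 = (left.map f).sum := by
  have h : ∀ acc : Int, left.foldl (fun acc val => acc + f val) acc = acc + (left.map f).sum := by
    induction left with
    | nil => intro acc; simp
    | cons v rest ih => intro acc; simp [ih]; ring
  simpa using h 0

lemma foldB_sum (sq : List Int) (hs : sq.Pairwise (· ≤ ·)) :
    ∀ (left : List Int), left.Pairwise (· ≤ ·) →
    ∀ (k : Nat) (acc : Int), (∀ v ∈ left, k ≤ sq.countP (fun y => decide (y < v))) →
    (left.foldl (fun (st : Nat × Int) val =>
        let k := pvBump sq val st.1; (k, st.2 + (k : Int))) (k, acc)).2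
      = acc + (left.map (fun v => ((sq.countP (fun y => decide (y < v)) : Nat) : Int))).sum := by
  intro left
  induction left with
  | nil => intro _ k acc _; simp
  | cons v rest ih =>
      intro hl k acc hk
      rw [List.pairwise_cons] at hl
      have hkv : pvBump sq v k = sq.countP (fun y => decide (y < v)) :=
        pvBump_eq sq hs v k (hk v List.mem_cons_self)
      simp only [List.foldl_cons, hkv]
      rw [ih hl.2 _ _ (fun w hw => by
        apply List.countP_mono_left
        intro x _ hx
        simp only [decide_eq_true_eq] at hx ⊢
        exact lt_of_lt_of_le hx (hl.1 w hw))]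
      simp [List.map_cons, List.sum_cons]
      ring

lemma sq_perm (r : List Int) :
    ((((r.filter (fun x => decide (x < 0))).map (fun x => x * x)).reverse)
        ++ ((r.filter (fun x => decide (0 ≤ x))).map (fun x => x * x))).Perm
      (r.map (fun x => x * x)) := by
  refine (List.Perm.append (List.reverse_perm _) (List.Perm.refl _)).trans ?_
  rw [← List.map_append]
  refine List.Perm.map _ ?_
  have hfc : r.filter (fun x => decide (0 ≤ x)) = r.filter (fun x => !decide (x < 0)) := by
    apply List.filter_congr
    intro x _
    by_cases hx : x < 0 <;> simp [hx] <;> omega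
  rw [hfc]
  exact List.filter_append_perm _ r

lemma sorted_squares_eq (r : List Int) :
    PySem.List.sorted (r.map (fun x => x * x)) (fun x => x) false
      = PySem.List.sorted ((((r.filter (fun x => decide (x < 0))).map (fun x => x * x)).reverse)
          ++ ((r.filter (fun x => decide (0 ≤ x))).map (fun x => x * x))) (fun x => x) false :=
  PySem.List.sorted_eq_sorted_of_perm _ _ _ (fun _ _ h => h) (sq_perm r).symm

-- on sorted halves, A's merge step (sort the squares + bisects) computes exactly B's merge step
lemma special_eq (l r : List Int) (hl : l.Pairwise (· ≤ ·)) (hr : r.Pairwise (· ≤ ·)) :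
    pvSpecialA l r =
      (PySem.List.sorted (l ++ r) (fun x => x) false,
        (l.foldl (fun (st : Nat × Int) val =>
            let k := pvBump (PySem.List.sorted
              ((((r.filter (fun x => decide (x < 0))).map (fun x => x * x)).reverse)
                ++ ((r.filter (fun x => decide (0 ≤ x))).map (fun x => x * x))) (fun x => x) false) val st.1;
            (k, st.2 + (k : Int))) (0, 0)).2) := by
  set sq := PySem.List.sorted
      ((((r.filter (fun x => decide (x < 0))).map (fun x => x * x)).reverse)
        ++ ((r.filter (fun x => decide (0 ≤ x))).map (fun x => x * x))) (fun x => x) false with hsq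
  have hsqs : sq.Pairwise (· ≤ ·) := PySem.List.sorted_pairwise _ _
  unfold pvSpecialA
  refine Prod.ext ?_ ?_
  · exact (PySem.List.sorted_id_eq_of_perm_of_pairwise _ _ (pvMergeA_perm l r)
      (pvMergeA_pairwise l r hl hr)).symm
  · show (l.foldl (fun acc val =>
        acc + ((PySem.List.bisectRight
          (PySem.List.sorted (r.map (fun x => x * x)) (fun x => x) false) (val - 1) : Nat) : Int)) 0) = _
    rw [sorted_squares_eq r, ← hsq]
    rw [foldA_sum l (fun val => ((PySem.List.bisectRight sq (val - 1) : Nat) : Int))]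
    rw [foldB_sum sq hsqs l hl 0 0 (fun v _ => Nat.zero_le _)]
    simp only [zero_add]
    congr 1
    apply List.map_congr_left
    intro v _
    rw [bisect_eq_countP sq hsqs v]

lemma pvBase (arr : List Int) (h : arr.length ≤ 1) : arr.Pairwise (· ≤ ·) := by
  rcases arr with _ | ⟨x, _ | ⟨y, t⟩⟩ <;> simp_all

lemma pvMainAux : ∀ n (arr : List Int), arr.length ≤ n →
    merge_sort_and_count arr = merge_sort_and_count_alt arr ∧
      (merge_sort_and_count arr).1.Pairwise (· ≤ ·) := by
  intro n
  induction n with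
  | zero =>
      intro arr hn
      have h : arr.length ≤ 1 := by omega
      rw [merge_sort_and_count, merge_sort_and_count_alt]
      simp only [dif_pos h]
      exact ⟨trivial, by simpa using pvBase arr h⟩
  | succ n ih =>
      intro arr hn
      by_cases h : arr.length ≤ 1
      · rw [merge_sort_and_count, merge_sort_and_count_alt]
        simp only [dif_pos h]
        exact ⟨trivial, by simpa using pvBase arr h⟩
      · obtain ⟨eL, sL⟩ := ih (arr.take (arr.length / 2)) (by simp; omega)
        obtain ⟨eR, sR⟩ := ih (arr.drop (arr.length / 2)) (by simp; omega)
        rw [merge_sort_and_count, merge_sort_and_count_alt]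
        simp only [dif_neg h]
        rw [eL, eR]
        set L := merge_sort_and_count_alt (arr.take (arr.length / 2)) with hL
        set R := merge_sort_and_count_alt (arr.drop (arr.length / 2)) with hR
        have sL' : L.1.Pairwise (· ≤ ·) := by rw [← eL]; exact sL
        have sR' : R.1.Pairwise (· ≤ ·) := by rw [← eR]; exact sR
        have hspec := special_eq L.1 R.1 sL' sR'
        constructor
        · rw [hspec]
        · rw [hspec]
          simpa using PySem.List.sorted_pairwise (L.1 ++ R.1) (fun x : Int => x)

theorem pvMain (arr : List Int) :
    merge_sort_and_count arr = merge_sort_and_count_alt arr ∧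
      (merge_sort_and_count arr).1.Pairwise (· ≤ ·) :=
  pvMainAux arr.length arr le_rfl

-- ===== VERDICT (by name: the statement is the Claim_ definition above) =====
theorem merge_sort_and_count_spec : Claim_equal_merge_sort_and_count := by
  intro arr _
  unfold Spec_merge_sort_and_count
  exact (pvMain arr).1
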